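-- pv_equiv track=rewrite | github.com/eliottcassidy2000/math | 04-computation/topology_landscape.py | classify_topology
-- ===== SOURCE A (Python) =====
-- def classify_topology(betti):
--     """Map Betti numbers to known topological space."""
--     b = tuple(betti)
--     # Trim trailing zeros
--     while len(b) > 1 and b[-1] == 0:
--         b = b[:-1]
--
--     if b == (1,):
--         return "point (contractible)"
--     elif b == (1, 1):
--         return "S^1 (circle)"
--     elif b == (1, 2, 1):
--         return "T^2 (torus)"
--     elif b == (1, 0, 1):
--         return "S^2 (2-sphere)"
--     elif b == (1, 0, 0, 1):
--         return "S^3 (3-sphere)"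
--     elif b == (1, 0, 0, 0, 1):
--         return "S^4 (4-sphere)"
--     elif b[0] == 1 and b[1] == 0 and all(x == 0 for x in b[2:-1]) and b[-1] > 0:
--         dim = len(b) - 1
--         mult = b[-1]
--         if mult == 1:
--             return f"S^{dim} ({dim}-sphere)"
--         else:
--             return f"{mult}×S^{dim}"
--     elif b == (1, 1, 0, 1):
--         return "S^1 ∨ S^3"  # wedge
--     else:
--         # Try to decompose
--         parts = []
--         for i in range(1, len(b)):
--             if b[i] > 0:
--                 parts.append(f"β_{i}={b[i]}")
--         return "mixed: " + ", ".join(parts)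
-- ===== SOURCE B (Python) =====
-- def classify_topology(betti):
--     """Map Betti numbers to known topological space."""
--     # Classify from the sparse support of the sequence: the nonzero (index, value)
--     # pairs at indices >= 1. Trailing zeros never enter the support, so no explicit
--     # trimming pass is needed; each named space is a pattern on the support.
--     b0 = betti[0]
--     support = [(i, v) for i, v in enumerate(betti) if i >= 1 and v != 0]
--     if b0 == 1:
--         if not support:
--             return "point (contractible)"
--         if support == [(1, 1)]:
--             return "S^1 (circle)"
--         if support == [(1, 2), (2, 1)]:
--             return "T^2 (torus)"
--         if support == [(1, 1), (3, 1)]: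
--             return "S^1 \u2228 S^3"
--         if len(support) == 1 and support[0][0] >= 2 and support[0][1] > 0:
--             dim, mult = support[0]
--             return f"S^{dim} ({dim}-sphere)" if mult == 1 else f"{mult}\u00d7S^{dim}"
--     return "mixed: " + ", ".join(f"\u03b2_{i}={v}" for i, v in support if v > 0)
-- ===== Notes on version B (the rewrite author's own statement) =====
-- stated objective: alternative
-- what changed: B never builds the trimmed tuple: it classifies from the sparse support (the nonzero (index,value) pairs at indices >= 1, which trailing zeros never enter), recognizing each named space and the whole sphere family (including A's redundant explicit S^2/S^3/S^4 cases) as patterns on that support, and emits the mixed description straight from the positive support entries.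
import Mathlib
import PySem

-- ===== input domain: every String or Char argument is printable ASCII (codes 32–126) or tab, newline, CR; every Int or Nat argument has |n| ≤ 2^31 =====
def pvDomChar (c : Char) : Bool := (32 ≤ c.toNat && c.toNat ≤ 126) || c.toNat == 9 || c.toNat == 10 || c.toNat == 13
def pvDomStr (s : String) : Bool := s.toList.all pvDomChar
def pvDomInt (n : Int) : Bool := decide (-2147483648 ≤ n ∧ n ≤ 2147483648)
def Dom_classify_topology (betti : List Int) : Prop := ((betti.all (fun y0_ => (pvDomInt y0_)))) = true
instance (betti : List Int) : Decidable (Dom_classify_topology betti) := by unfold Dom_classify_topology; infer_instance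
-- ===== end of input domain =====

-- B classifies from the sparse support (nonzero (index,value) pairs at indices ≥ 1) computed
-- directly on the raw input — no trimmed tuple is ever built — with each named space and the
-- whole sphere family recognized as patterns on that support (objective: alternative).

-- ===== PORT A =====
-- while len(b) > 1 and b[-1] == 0: b = b[:-1]
def trimA (b : List Int) : List Int :=
  if 1 < b.length ∧ PySem.List.pyGetD b (-1) 0 = 0 then trimA b.dropLast else b
termination_by b.length
decreasing_by simp [List.length_dropLast]; omega

-- the if/elif ladder after the trim loop (b[0]/b[1]/b[-1] via pyGet?/pyGetD: exact on the
-- nonempty lists Pre_ admits; Python raises on the empty tuple)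
def classifyA (b : List Int) : String :=
  if b = [1] then "point (contractible)"
  else if b = [1, 1] then "S^1 (circle)"
  else if b = [1, 2, 1] then "T^2 (torus)"
  else if b = [1, 0, 1] then "S^2 (2-sphere)"
  else if b = [1, 0, 0, 1] then "S^3 (3-sphere)"
  else if b = [1, 0, 0, 0, 1] then "S^4 (4-sphere)"
  else if PySem.List.pyGet? b 0 = some 1 ∧ PySem.List.pyGet? b 1 = some 0 ∧
      (PySem.List.slice b (some 2) (some (-1))).all (fun x => x == 0) ∧
      0 < PySem.List.pyGetD b (-1) 0 then
    let dim : Int := (b.length : Int) - 1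
    let mult : Int := PySem.List.pyGetD b (-1) 0
    if mult = 1 then "S^" ++ PySem.Int.toStr dim ++ " (" ++ PySem.Int.toStr dim ++ "-sphere)"
    else PySem.Int.toStr mult ++ "×S^" ++ PySem.Int.toStr dim
  else if b = [1, 1, 0, 1] then "S^1 ∨ S^3"
  else
    let parts := (PySem.List.pyRange 1 (b.length : Int) 1).foldl
      (fun acc i => if 0 < PySem.List.pyGetD b i 0 then
          acc ++ ["β_" ++ PySem.Int.toStr i ++ "=" ++ PySem.Int.toStr (PySem.List.pyGetD b i 0)]
        else acc) []
    "mixed: " ++ PySem.Str.join ", " parts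

def classify_topology (betti : List Int) : String := classifyA (trimA betti)

-- ===== PORT B =====
-- support = [(i, v) for i, v in enumerate(betti) if i >= 1 and v != 0]
def sparseB (l : List Int) : List (Int × Int) :=
  (PySem.List.enumerate l 0).filter (fun p => decide (1 ≤ p.1) && (p.2 != 0))

-- "mixed: " + ", ".join(f"β_{i}={v}" for i, v in support if v > 0)
def mixedB (s : List (Int × Int)) : String :=
  "mixed: " ++ PySem.Str.join ", "
    ((s.filter (fun p => decide (0 < p.2))).map
      (fun p => "β_" ++ PySem.Int.toStr p.1 ++ "=" ++ PySem.Int.toStr p.2))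

def classifyB (b0 : Int) (s : List (Int × Int)) : String :=
  if b0 = 1 then
    if s = [] then "point (contractible)"
    else if s = [(1, 1)] then "S^1 (circle)"
    else if s = [(1, 2), (2, 1)] then "T^2 (torus)"
    else if s = [(1, 1), (3, 1)] then "S^1 ∨ S^3"
    else if s.length = 1 ∧ 2 ≤ (s.headD (0, 0)).1 ∧ 0 < (s.headD (0, 0)).2 then
      let dim : Int := (s.headD (0, 0)).1
      let mult : Int := (s.headD (0, 0)).2
      if mult = 1 then "S^" ++ PySem.Int.toStr dim ++ " (" ++ PySem.Int.toStr dim ++ "-sphere)"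
      else PySem.Int.toStr mult ++ "×S^" ++ PySem.Int.toStr dim
    else mixedB s
  else mixedB s

-- b0 = betti[0] via pyGetD: exact on the nonempty lists Pre_ admits (Python raises on [])
def classify_topology_alt (betti : List Int) : String :=
  classifyB (PySem.List.pyGetD betti 0 0) (sparseB betti)

-- ===== PRECONDITION & SPEC =====
-- Python A raises IndexError (b[0]) on the empty list; Pre_ excludes exactly that input.
def Pre_classify_topology (betti : List Int) : Prop := betti ≠ []
instance (betti : List Int) : Decidable (Pre_classify_topology betti) := by
  unfold Pre_classify_topology; infer_instance
def pvWitness_classify_topology : List Int := ([1, 0, 1])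

def Spec_classify_topology (betti : List Int) (out : String) : Prop := out = classify_topology_alt betti
instance (betti : List Int) (out : String) : Decidable (Spec_classify_topology betti out) := by unfold Spec_classify_topology; infer_instance

-- ===== CLAIM (what is proved, stated in full; the proofs are below) =====
def Claim_equal_classify_topology : Prop := ∀ (betti : List Int), Dom_classify_topology betti → Pre_classify_topology betti → Spec_classify_topology betti (classify_topology betti)

-- ===== LEMMAS AND PROOFS =====

theorem mem_sparseB (l : List Int) (p : Int × Int) :
    p ∈ sparseB l ↔ (∃ (k : Nat) (h : k < l.length), p = ((k : Int), l[k])) ∧ 1 ≤ p.1 ∧ p.2 ≠ 0 := by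
  simp [sparseB, List.mem_filter, PySem.List.mem_enumerate_iff]

theorem pairwise_sparseB (l : List Int) : (sparseB l).Pairwise (fun p q => p.1 < q.1) :=
  (PySem.List.pairwise_lt_enumerate l 0).filter _

-- sparse of append-with-zero

theorem sparseB_append_zero (xs : List Int) :
    sparseB (xs ++ [0]) = sparseB xs := by
  simp [sparseB, PySem.List.enumerate_append, List.filter_append]

theorem trimA_props : ∀ (n : Nat) (betti : List Int), betti.length ≤ n → betti ≠ [] →
    trimA betti ≠ [] ∧ (trimA betti).headD 0 = betti.headD 0 ∧
    ((trimA betti).length = 1 ∨ (trimA betti).getLastD 0 ≠ 0) ∧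
    sparseB (trimA betti) = sparseB betti := by
  intro n
  induction n with
  | zero =>
    intro betti h hne
    exact absurd (List.length_eq_zero_iff.mp (by omega)) hne
  | succ n ih =>
    intro betti hlen hne
    by_cases hc : 1 < betti.length ∧ PySem.List.pyGetD betti (-1) 0 = 0
    · have hz : betti.getLast hne = 0 := by
        rw [← PySem.List.pyGetD_neg_one betti 0 hne]; exact hc.2
      have hsplit : betti = betti.dropLast ++ [0] := by
        conv_lhs => rw [← List.dropLast_concat_getLast hne]
        rw [hz]
      have hdne : betti.dropLast ≠ [] := by
        intro h0
        have := betti.length_dropLast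
        rw [h0] at this
        simp at this
        omega
      have hdl : betti.dropLast.length ≤ n := by
        have := betti.length_dropLast; omega
      obtain ⟨p1, p2, p3, p4⟩ := ih betti.dropLast hdl hdne
      rw [trimA, if_pos hc]
      refine ⟨p1, ?_, p3, ?_⟩
      · rw [p2]
        cases hb : betti with
        | nil => exact absurd hb hne
        | cons x xs =>
          cases xs with
          | nil => simp [hb] at hc
          | cons y ys => simp
      · rw [p4]
        conv_rhs => rw [hsplit]
        rw [sparseB_append_zero]
    · rw [trimA, if_neg hc]
      refine ⟨hne, rfl, ?_, rfl⟩
      by_cases h1 : betti.length = 1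
      · exact Or.inl h1
      · right
        have hgt : 1 < betti.length := by
          have := List.length_pos_iff.mpr hne; omega
        intro h0
        exact hc ⟨hgt, by
          rw [PySem.List.pyGetD_neg_one betti 0 hne]
          have : betti.getLastD 0 = betti.getLast hne := by
            rw [List.getLastD_eq_getLast?, List.getLast?_eq_some_getLast hne]; rfl
          rw [← this]; exact h0⟩

theorem getLastD_eq_getElem (t : List Int) (h : t ≠ []) :
    t.getLastD 0 = t[t.length - 1]'(by have := List.length_pos_iff.mpr h; omega) := by
  rw [List.getLastD_eq_getLast?, List.getLast?_eq_some_getLast h, Option.getD_some,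
    List.getLast_eq_getElem]

theorem last_mem_sparseB (t : List Int) (h2 : 2 ≤ t.length) (hl : t.getLastD 0 ≠ 0) :
    ((t.length : Int) - 1, t.getLastD 0) ∈ sparseB t := by
  rw [mem_sparseB]
  refine ⟨⟨t.length - 1, by omega, ?_⟩, by simp; omega, hl⟩
  rw [getLastD_eq_getElem t (by intro h; subst h; simp at h2)]
  congr 1
  omega

theorem sparseB_idx_bound (t : List Int) (p : Int × Int) (hp : p ∈ sparseB t) :
    1 ≤ p.1 ∧ p.1 ≤ (t.length : Int) - 1 := by
  rw [mem_sparseB] at hp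
  obtain ⟨⟨k, hk, rfl⟩, h1, h2⟩ := hp
  constructor
  · exact h1
  · simp; omega

theorem sparseB_nil_len (t : List Int) (ht : t ≠ [])
    (hinv : t.length = 1 ∨ t.getLastD 0 ≠ 0) (hs : sparseB t = []) : t.length = 1 := by
  rcases hinv with h | h
  · exact h
  · by_contra h1
    have h2 : 2 ≤ t.length := by have := List.length_pos_iff.mpr ht; omega
    have := last_mem_sparseB t h2 h
    rw [hs] at this
    simp at this

theorem sparseB_len_one (x : Int) : sparseB [x] = [] := by
  simp [sparseB, PySem.List.enumerate_cons]

theorem sparseB_entry_zero (t : List Int) (k : Nat) (hk : k < t.length) (h1 : 1 ≤ k)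
    (hz : ¬ (((k : Int), t[k]) ∈ sparseB t)) : t[k] = 0 := by
  by_contra h0
  exact hz ((mem_sparseB t _).mpr ⟨⟨k, hk, rfl⟩, by simp; omega, h0⟩)

-- injectivity: head + sparse support determine a trimmed list

theorem sparseB_inj (t u : List Int) (ht : t ≠ []) (hu : u ≠ [])
    (hit : t.length = 1 ∨ t.getLastD 0 ≠ 0) (hiu : u.length = 1 ∨ u.getLastD 0 ≠ 0)
    (hh : t.headD 0 = u.headD 0) (hs : sparseB t = sparseB u) : t = u := by
  have hlt : 0 < t.length := List.length_pos_iff.mpr ht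
  have hlu : 0 < u.length := List.length_pos_iff.mpr hu
  have hlen : t.length = u.length := by
    by_cases h0 : sparseB t = []
    · rw [sparseB_nil_len t ht hit h0, sparseB_nil_len u hu hiu (hs ▸ h0)]
    · have h2t : 2 ≤ t.length := by
        by_contra h
        have h1 : t.length = 1 := by omega
        obtain ⟨x, rfl⟩ : ∃ x, t = [x] := by
          cases t with
          | nil => simp at hlt
          | cons a l => cases l with
            | nil => exact ⟨a, rfl⟩
            | cons b m => simp at h1
        exact h0 (sparseB_len_one x)
      have h2u : 2 ≤ u.length := by
        by_contra h
        have h1 : u.length = 1 := by omega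
        obtain ⟨x, rfl⟩ : ∃ x, u = [x] := by
          cases u with
          | nil => simp at hlu
          | cons a l => cases l with
            | nil => exact ⟨a, rfl⟩
            | cons b m => simp at h1
        exact h0 (hs.trans (sparseB_len_one x))
      have hmt := last_mem_sparseB t h2t (by rcases hit with h|h; omega; exact h)
      have hmu := last_mem_sparseB u h2u (by rcases hiu with h|h; omega; exact h)
      have b1 := (sparseB_idx_bound u _ (hs ▸ hmt)).2
      have b2 := (sparseB_idx_bound t _ (hs ▸ hmu)).2
      simp at b1 b2
      omega
  apply List.ext_getElem hlen
  intro i hi hi'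
  cases Nat.eq_zero_or_pos i with
  | inl h0 =>
    subst h0
    cases t with
    | nil => simp at hlt
    | cons a l => cases u with
      | nil => simp at hlu
      | cons b m => simpa using hh
  | inr h1 =>
    by_cases hz : t[i] = 0
    · rw [hz]
      by_contra h0
      have hm : ((i : Int), u[i]) ∈ sparseB u :=
        (mem_sparseB u _).mpr ⟨⟨i, hi', rfl⟩, by simp; omega, fun h => h0 h.symm⟩
      rw [← hs, mem_sparseB] at hm
      obtain ⟨⟨k, hk, hkk⟩, -, hnz⟩ := hm
      have : k = i := by
        have := congrArg Prod.fst hkk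
        simp at this
        omega
      subst this
      have := congrArg Prod.snd hkk
      simp at this
      exact hnz (this ▸ hz)
    · have hm : ((i : Int), t[i]) ∈ sparseB t :=
        (mem_sparseB t _).mpr ⟨⟨i, hi, rfl⟩, by simp; omega, hz⟩
      rw [hs, mem_sparseB] at hm
      obtain ⟨⟨k, hk, hkk⟩, -, -⟩ := hm
      have hki : k = i := by
        have := congrArg Prod.fst hkk
        simp at this
        omega
      subst hki
      have := congrArg Prod.snd hkk
      simp at this
      exact this

theorem sliceA_cons (x y z : Int) (rest : List Int) :
    PySem.List.slice (x :: y :: z :: rest) (some 2) (some (-1)) = (z :: rest).dropLast := by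
  simp [PySem.List.slice, PySem.List.clampIdx]
  rw [if_neg (by omega), show (↑rest.length + 1 + 1 : Int).toNat - 2 = rest.length from by omega,
    List.dropLast_eq_take]
  simp

theorem singleton_of_pairwise (s : List (Int × Int)) (x : Int × Int)
    (hpw : s.Pairwise (fun p q => p.1 < q.1)) (hx : x ∈ s) (hall : ∀ y ∈ s, y = x) :
    s = [x] := by
  cases s with
  | nil => simp at hx
  | cons a r =>
    have ha : a = x := hall a (List.mem_cons_self)
    cases r with
    | nil => rw [ha]
    | cons b r2 =>
      have hb : b = x := hall b (List.mem_cons_of_mem _ List.mem_cons_self)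
      have := (List.pairwise_cons.mp hpw).1 b List.mem_cons_self
      rw [ha, hb] at this
      exact absurd this (lt_irrefl _)

-- middle entries of a sphere-shaped list are zero, indexed form

theorem mid_zero_of_all (t : List Int) (h3 : 3 ≤ t.length)
    (hmid : (PySem.List.slice t (some 2) (some (-1))).all (fun x => x == 0) = true)
    (k : Nat) (hk2 : 2 ≤ k) (hke : k ≤ t.length - 2) :
    t[k]'(by omega) = 0 := by
  match t, h3 with
  | x :: y :: z :: rest, _ =>
    rw [sliceA_cons] at hmid
    simp only [List.all_eq_true, beq_iff_eq] at hmid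
    have hlen : (x :: y :: z :: rest).length = rest.length + 3 := by simp
    have hkd : k - 2 < (z :: rest).dropLast.length := by
      simp at hke ⊢
      omega
    have hmem : (z :: rest).dropLast[k - 2] ∈ (z :: rest).dropLast := List.getElem_mem _
    have hz := hmid _ hmem
    rw [List.getElem_dropLast] at hz
    have : (x :: y :: z :: rest)[k]'(by omega) = (z :: rest)[k - 2]'(by simp at hke ⊢; omega) := by
      match k, hk2 with
      | (n + 2), _ => simp
    rw [this, hz]

theorem all_of_mid_zero (t : List Int) (h3 : 3 ≤ t.length)
    (hz : ∀ (k : Nat) (h2 : 2 ≤ k) (hke : k ≤ t.length - 2), t[k]'(by omega) = 0) :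
    (PySem.List.slice t (some 2) (some (-1))).all (fun x => x == 0) = true := by
  match t, h3 with
  | x :: y :: z :: rest, _ =>
    rw [sliceA_cons]
    simp only [List.all_eq_true, beq_iff_eq]
    intro w hw
    obtain ⟨j, hj, rfl⟩ := List.mem_iff_getElem.mp hw
    rw [List.getElem_dropLast]
    have hj' : j < rest.length := by simpa using hj
    have := hz (j + 2) (by omega) (by simp; omega)
    simpa using this

theorem pyGetD_neg_one_D (t : List Int) (ht : t ≠ []) :
    PySem.List.pyGetD t (-1) 0 = t.getLastD 0 := by
  rw [PySem.List.pyGetD_neg_one t 0 ht, List.getLastD_eq_getLast?,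
    List.getLast?_eq_some_getLast ht, Option.getD_some]

theorem head_pyGet (t : List Int) (ht : t ≠ []) :
    PySem.List.pyGet? t 0 = some (t.headD 0) := by
  cases t with
  | nil => exact absurd rfl ht
  | cons x xs => rw [PySem.List.pyGet?_zero_cons]; rfl

theorem sphere_sparse (t : List Int) (ht : t ≠ [])
    (h0 : PySem.List.pyGet? t 0 = some 1) (h1 : PySem.List.pyGet? t 1 = some 0)
    (hmid : (PySem.List.slice t (some 2) (some (-1))).all (fun x => x == 0) = true)
    (hpos : 0 < PySem.List.pyGetD t (-1) 0) :
    3 ≤ t.length ∧ sparseB t = [((t.length : Int) - 1, t.getLastD 0)] ∧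
    0 < t.getLastD 0 ∧ t.headD 0 = 1 := by
  have hl : 0 < t.length := List.length_pos_iff.mpr ht
  have hlast : 0 < t.getLastD 0 := by rw [← pyGetD_neg_one_D t ht]; exact hpos
  have h1len : 1 < t.length := by
    by_contra h
    rw [(PySem.List.pyGet?_eq_none_iff t 1).mpr (by simp [PySem.Raise.InRange]; omega)] at h1
    simp at h1
  have ht1 : t[1] = 0 := by
    have := PySem.List.pyGet?_ofNat (xs := t) (n := 1) h1len
    simp only [Nat.cast_one] at this
    rw [this] at h1
    simpa using h1
  have h3 : 3 ≤ t.length := by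
    by_contra h
    have h2 : t.length = 2 := by omega
    rw [getLastD_eq_getElem t ht] at hlast
    have : t[t.length - 1]'(by omega) = t[1] := by congr 1; omega
    rw [this, ht1] at hlast
    omega
  have hne0 : t.getLastD 0 ≠ 0 := by omega
  have hall : ∀ y ∈ sparseB t, y = ((t.length : Int) - 1, t.getLastD 0) := by
    intro y hy
    rw [mem_sparseB] at hy
    obtain ⟨⟨k, hk, rfl⟩, hk1, hnz⟩ := hy
    simp only at hk1 hnz
    have hk1' : 1 ≤ k := by exact_mod_cast hk1
    by_cases hke : k = t.length - 1
    · subst hke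
      rw [getLastD_eq_getElem t ht]
      simp only [Prod.mk.injEq]
      exact ⟨by omega, trivial⟩
    · exfalso
      rcases Nat.lt_or_ge k 2 with h2 | h2
      · have : k = 1 := by omega
        subst this
        exact hnz ht1
      · exact hnz (mid_zero_of_all t h3 hmid k h2 (by omega))
  have hmem := last_mem_sparseB t (by omega) hne0
  refine ⟨h3, singleton_of_pairwise _ _ (pairwise_sparseB t) hmem hall, hlast, ?_⟩
  have := head_pyGet t ht
  rw [this] at h0
  simpa using h0

theorem sparse_sphere (t : List Int) (ht : t ≠ [])
    (hinv : t.length = 1 ∨ t.getLastD 0 ≠ 0) (hh : t.headD 0 = 1) (p : Int × Int)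
    (hs : sparseB t = [p]) (h2 : 2 ≤ p.1) (hp : 0 < p.2) :
    (PySem.List.pyGet? t 0 = some 1 ∧ PySem.List.pyGet? t 1 = some 0 ∧
      (PySem.List.slice t (some 2) (some (-1))).all (fun x => x == 0) = true ∧
      0 < PySem.List.pyGetD t (-1) 0) ∧
    p = ((t.length : Int) - 1, t.getLastD 0) := by
  have hl : 0 < t.length := List.length_pos_iff.mpr ht
  have hpm : p ∈ sparseB t := by rw [hs]; exact List.mem_cons_self
  obtain ⟨⟨k, hk, hpk⟩, -, -⟩ := (mem_sparseB t p).mp hpm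
  have hk2 : 2 ≤ k := by
    have := congrArg Prod.fst hpk
    simp at this
    omega
  have h3 : 3 ≤ t.length := by omega
  have hne0 : t.getLastD 0 ≠ 0 := by rcases hinv with h | h; omega; exact h
  have hlastmem := last_mem_sparseB t (by omega) hne0
  rw [hs] at hlastmem
  simp at hlastmem
  rw [← List.getLastD_eq_getLast?] at hlastmem
  have hpeq : p = ((t.length : Int) - 1, t.getLastD 0) := hlastmem.symm
  have hlastpos : 0 < t.getLastD 0 := by
    have h := hp
    rw [hpeq] at h
    simpa using h
  have hmidz : ∀ (j : Nat) (hj2 : 2 ≤ j) (hje : j ≤ t.length - 2), t[j]'(by omega) = 0 := by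
    intro j hj2 hje
    apply sparseB_entry_zero t j (by omega) (by omega)
    rw [hs]
    intro hmem
    simp at hmem
    have := congrArg Prod.fst hmem
    rw [hpeq] at this
    simp at this
    omega
  have ht1 : t[1]'(by omega) = 0 := by
    apply sparseB_entry_zero t 1 (by omega) le_rfl
    rw [hs]
    intro hmem
    simp at hmem
    have := congrArg Prod.fst hmem
    rw [hpeq] at this
    simp at this
    omega
  refine ⟨⟨?_, ?_, all_of_mid_zero t h3 hmidz, ?_⟩, hpeq⟩
  · rw [head_pyGet t ht, hh]
  · have := PySem.List.pyGet?_ofNat (xs := t) (n := 1) (by omega)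
    simp only [Nat.cast_one] at this
    rw [this, ht1]
  · rw [pyGetD_neg_one_D t ht]; omega

theorem foldl_if_append {α β : Type} (p : α → Prop) [DecidablePred p] (f : α → β)
    (l : List α) : ∀ (acc : List β),
      l.foldl (fun acc x => if p x then acc ++ [f x] else acc) acc
        = acc ++ (l.filter (fun x => decide (p x))).map f := by
  induction l with
  | nil => intro acc; simp
  | cons x xs ih => intro acc; by_cases h : p x <;> simp [h, ih]

theorem mixed_eq (b : List Int) :
    (PySem.List.pyRange 1 (b.length : Int) 1).foldl
        (fun acc i => if 0 < PySem.List.pyGetD b i 0 then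
            acc ++ ["β_" ++ PySem.Int.toStr i ++ "=" ++ PySem.Int.toStr (PySem.List.pyGetD b i 0)]
          else acc) []
      = ((PySem.List.enumerate b 0).filter (fun p => decide (0 < p.1) && decide (0 < p.2))).map
          (fun p => "β_" ++ PySem.Int.toStr p.1 ++ "=" ++ PySem.Int.toStr p.2) := by
  rw [foldl_if_append (fun i => 0 < PySem.List.pyGetD b i 0)
    (fun i => "β_" ++ PySem.Int.toStr i ++ "=" ++ PySem.Int.toStr (PySem.List.pyGetD b i 0)),
    PySem.List.enumerate_eq_map_pyRange (d := 0), List.filter_map, List.map_map]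
  rcases Nat.eq_zero_or_pos b.length with h0 | hpos
  · simp [h0, PySem.List.pyRange_one_eq_nil]
  · have hl : ((PySem.List.len b) : Int) = (b.length : Int) := by simp [PySem.List.len]
    rw [hl, PySem.List.pyRange_one_cons (a := 0) (b := (b.length : Int)) (by exact_mod_cast hpos),
      List.filter_cons]
    simp only [Function.comp_def, List.nil_append]
    rw [if_neg (by simp)]
    rw [show (0 : Int) + 1 = 1 from by norm_num]
    refine congrArg _ (List.filter_congr ?_)
    intro i hi
    have hm := (PySem.List.mem_pyRange_one).mp hi
    have h0i : (0 : Int) < i := by omega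
    simp [h0i]

theorem filter_bridge (l : List (Int × Int)) :
    (l.filter (fun p => decide (1 ≤ p.1) && (p.2 != 0))).filter (fun p => decide (0 < p.2))
      = l.filter (fun p => decide (0 < p.1) && decide (0 < p.2)) := by
  rw [List.filter_filter]
  apply List.filter_congr
  intro p _
  by_cases h1 : 0 < p.2 <;> by_cases h2 : 1 ≤ p.1
  · simp [h1, h2, show p.2 ≠ 0 from by omega, show 0 < p.1 from by omega]
  · simp [h1, h2, show ¬ (0 < p.1) from by omega]
  · simp [h1, h2]
  · simp [h1, h2]

theorem mixed_final (t : List Int) :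
    (PySem.Str.join ", " ((PySem.List.pyRange 1 (t.length : Int) 1).foldl
        (fun acc i => if 0 < PySem.List.pyGetD t i 0 then
            acc ++ ["β_" ++ PySem.Int.toStr i ++ "=" ++ PySem.Int.toStr (PySem.List.pyGetD t i 0)]
          else acc) []) : String)
      = PySem.Str.join ", " (((sparseB t).filter (fun p => decide (0 < p.2))).map
          (fun p => "β_" ++ PySem.Int.toStr p.1 ++ "=" ++ PySem.Int.toStr p.2)) := by
  rw [mixed_eq, sparseB, filter_bridge]

theorem classify_eq (t : List Int) (ht : t ≠ [])
    (hinv : t.length = 1 ∨ t.getLastD 0 ≠ 0) :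
    classifyA t = classifyB (t.headD 0) (sparseB t) := by
  by_cases e1 : t = [1]
  · subst e1; decide
  by_cases e2 : t = [1, 1]
  · subst e2; decide
  by_cases e3 : t = [1, 2, 1]
  · subst e3; decide
  by_cases e4 : t = [1, 0, 1]
  · subst e4; decide
  by_cases e5 : t = [1, 0, 0, 1]
  · subst e5; decide
  by_cases e6 : t = [1, 0, 0, 0, 1]
  · subst e6; decide
  by_cases e7 : t = [1, 1, 0, 1]
  · subst e7; decide
  rw [classifyA]
  rw [if_neg e1, if_neg e2, if_neg e3, if_neg e4, if_neg e5, if_neg e6]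
  by_cases hA : PySem.List.pyGet? t 0 = some 1 ∧ PySem.List.pyGet? t 1 = some 0 ∧
      (PySem.List.slice t (some 2) (some (-1))).all (fun x => x == 0) = true ∧
      0 < PySem.List.pyGetD t (-1) 0
  · obtain ⟨h3, hsp, hpos, hh⟩ := sphere_sparse t ht hA.1 hA.2.1 hA.2.2.1 hA.2.2.2
    rw [if_pos hA, classifyB, if_pos hh, hsp]
    have g2 : ¬ ([((t.length : Int) - 1, t.getLastD 0)] = [((1 : Int), (1 : Int))]) := by
      intro h
      have := congrArg (fun l => (l.headD ((0 : Int), (0 : Int))).1) h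
      simp at this
      omega
    have hnil : ¬ ([((t.length : Int) - 1, t.getLastD 0)] = ([] : List (Int × Int))) := by simp
    have g3 : ¬ ([((t.length : Int) - 1, t.getLastD 0)]
        = [((1 : Int), (2 : Int)), ((2 : Int), (1 : Int))]) := by simp
    have g4 : ¬ ([((t.length : Int) - 1, t.getLastD 0)]
        = [((1 : Int), (1 : Int)), ((3 : Int), (1 : Int))]) := by simp
    have hguard : ([((t.length : Int) - 1, t.getLastD 0)].length = 1 ∧
        2 ≤ (([((t.length : Int) - 1, t.getLastD 0)]).headD ((0 : Int), (0 : Int))).1 ∧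
        0 < (([((t.length : Int) - 1, t.getLastD 0)]).headD ((0 : Int), (0 : Int))).2) :=
      ⟨by simp, by simp; omega, by simpa using hpos⟩
    rw [if_neg hnil, if_neg g2, if_neg g3, if_neg g4, if_pos hguard]
    simp only [List.headD_cons]
    rw [pyGetD_neg_one_D t ht]
  · rw [if_neg hA, if_neg e7, classifyB]
    have hmix : mixedB (sparseB t)
        = "mixed: " ++ PySem.Str.join ", " ((PySem.List.pyRange 1 (t.length : Int) 1).foldl
          (fun acc i => if 0 < PySem.List.pyGetD t i 0 then
              acc ++ ["β_" ++ PySem.Int.toStr i ++ "=" ++ PySem.Int.toStr (PySem.List.pyGetD t i 0)]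
            else acc) []) := by
      rw [mixedB, mixed_final]
    by_cases hb0 : t.headD 0 = 1
    · rw [if_pos hb0]
      have inv1 : ∀ (L : List Int), L.length = 1 ∨ L.getLastD 0 ≠ 0 → t.headD 0 = L.headD 0 →
          sparseB t = sparseB L → t = L := fun L hL hh hs =>
        sparseB_inj t L ht (by intro h; subst h; rcases hL with h|h; simp at h; simp at h) hinv hL hh hs
      rw [if_neg, if_neg, if_neg, if_neg, if_neg, hmix]
      · -- sphere guard fails
        intro ⟨hlen1, hd1, hd2⟩
        obtain ⟨p, hp⟩ : ∃ p, sparseB t = [p] := by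
          cases hsp : sparseB t with
          | nil => rw [hsp] at hlen1; simp at hlen1
          | cons a r =>
            rw [hsp] at hlen1
            simp at hlen1
            exact ⟨a, by rw [hlen1]⟩
        rw [hp] at hd1 hd2
        simp only [List.headD_cons] at hd1 hd2
        exact hA ((sparse_sphere t ht hinv hb0 p hp hd1 hd2).1)
      · exact fun h => e7 (inv1 [1,1,0,1] (by decide) (by rw [hb0]; decide) (by rw [h]; decide))
      · exact fun h => e3 (inv1 [1,2,1] (by decide) (by rw [hb0]; decide) (by rw [h]; decide))
      · exact fun h => e2 (inv1 [1,1] (by decide) (by rw [hb0]; decide) (by rw [h]; decide))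
      · exact fun h => e1 (inv1 [1] (by decide) (by rw [hb0]; decide) (by rw [h]; decide))
    · rw [if_neg hb0, hmix]

-- ===== VERDICT (by name: the statement is the Claim_ definition above) =====
theorem classify_topology_spec : Claim_equal_classify_topology := by
  intro betti _ hpre
  unfold Spec_classify_topology classify_topology classify_topology_alt
  obtain ⟨hne, hhead, hinv, hsp⟩ := trimA_props betti.length betti le_rfl hpre
  rw [classify_eq _ hne hinv, hsp, hhead]
  congr 1
  cases betti with
  | nil => exact absurd rfl hpre
  | cons x xs => simp [PySem.List.pyGetD_zero_cons]
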